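-- pv_equiv track=rewrite | github.com/Auceane/BUTinfo1_SAE_1.02-Comparaison_d.approches_algorithmiques | Partie 1/biology.py | est_adn
-- ===== SOURCE A (Python) =====
-- def est_base(car):
--     """
--     Cette fonction nous dit si le caractère traiter correspond a une base nucléique de l'adn.
--         car est le caractère testé.
--     """
--     return car=='A' or car=='T' or car=='G' or car=='C'
--
-- def est_adn(ch):
--     """
--     Cette fonction nous dit si les caractères de la chaîne de caractère sont bien des bases nucléiques.
--     vcar est la valeur de véritée de la chaîne ch qui est vérifié a chaque boucle pour voir si les caractères correspondes.
--     """
--     i=0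
--     if len(ch)==0:
--         return False
--     vcar=est_base(ch[i])
--     while i<len(ch)-1 and vcar==True:
--         i+=1
--         vcar=est_base(ch[i])
--     return vcar
-- ===== SOURCE B (Python) =====
-- def est_adn(ch):
--     return len(ch) > 0 and set(ch) <= {'A', 'T', 'G', 'C'}
-- ===== Notes on version B (the rewrite author's own statement) =====
-- stated objective: idiomatic
-- what changed: Replaces the index-based while-loop with an early-exit running boolean by building the set of the string's characters once and testing subset containment against the set of the four DNA bases (with a nonempty guard).
import Mathlib
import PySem

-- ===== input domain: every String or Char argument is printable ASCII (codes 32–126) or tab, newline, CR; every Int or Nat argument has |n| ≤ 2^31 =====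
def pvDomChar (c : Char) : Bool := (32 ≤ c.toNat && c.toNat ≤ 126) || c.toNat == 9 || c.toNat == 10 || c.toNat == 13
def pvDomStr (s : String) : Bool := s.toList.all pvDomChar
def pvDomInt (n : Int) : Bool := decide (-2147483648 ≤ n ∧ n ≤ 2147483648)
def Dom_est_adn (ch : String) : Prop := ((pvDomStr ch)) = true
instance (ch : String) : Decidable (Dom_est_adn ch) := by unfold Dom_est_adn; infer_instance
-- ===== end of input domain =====

-- B replaces A's index-based while-loop (running boolean, early exit) by a
-- build-the-character-set-then-subset test; equivalence of return values is proved.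

-- ===== PORT A =====
def est_base (car : Char) : Bool :=
  car == 'A' || car == 'T' || car == 'G' || car == 'C'

-- the while loop: i < len-1 ∧ vcar → i += 1; vcar = est_base ch[i].
-- ch[i+1] is ported as getD (i+1 < length holds whenever the branch is taken, so no IndexError).
def est_adn_loop (l : List Char) (i : Nat) (vcar : Bool) : Bool :=
  if i < l.length - 1 ∧ vcar = true then
    est_adn_loop l (i + 1) (est_base (l.getD (i + 1) ' '))
  else vcar
termination_by l.length - i
decreasing_by omega

def est_adn (ch : String) : Bool :=
  if ch.toList.length = 0 then false
  else est_adn_loop ch.toList 0 (est_base (ch.toList.getD 0 ' '))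

-- ===== PORT B =====
def est_adn_alt (ch : String) : Bool :=
  decide (ch.toList.length > 0) &&
    PySem.Set.issubset (PySem.Set.ofList ch.toList) ['A', 'T', 'G', 'C']

-- ===== PRECONDITION & SPEC =====
def Spec_est_adn (ch : String) (out : Bool) : Prop := out = est_adn_alt ch
instance (ch : String) (out : Bool) : Decidable (Spec_est_adn ch out) := by unfold Spec_est_adn; infer_instance

-- ===== CLAIM (what is proved, stated in full; the proofs are below) =====
def Claim_equal_est_adn : Prop := ∀ (ch : String), Dom_est_adn ch → Spec_est_adn ch (est_adn ch)

-- ===== LEMMAS AND PROOFS =====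

-- loop invariant: the loop returns vcar AND "every remaining char is a base"
theorem est_adn_loop_eq (l : List Char) (i : Nat) (vcar : Bool) :
    est_adn_loop l i vcar = (vcar && (l.drop (i + 1)).all est_base) := by
  induction i, vcar using est_adn_loop.induct l with
  | case1 i vcar h ih =>
    rw [est_adn_loop, if_pos h, ih]
    obtain ⟨hi, hv⟩ := h
    have hlt : i + 1 < l.length := by omega
    have hdrop : l.drop (i + 1) = l[i + 1] :: l.drop (i + 1 + 1) := List.drop_eq_getElem_cons hlt
    rw [hdrop]
    simp only [hv, Bool.true_and, List.all_cons]
    congr 1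
    simp [List.getD, List.getElem?_eq_getElem hlt]
  | case2 i vcar h =>
    rw [est_adn_loop, if_neg h]
    rcases Bool.eq_false_or_eq_true vcar with hv | hv
    · have hni : ¬ i < l.length - 1 := fun hi => h ⟨hi, hv⟩
      have hd : l.drop (i + 1) = [] := List.drop_eq_nil_of_le (by omega)
      simp [hd, hv]
    · simp [hv]

theorem est_adn_eq_all (ch : String) :
    est_adn ch = (decide (ch.toList.length > 0) && ch.toList.all est_base) := by
  unfold est_adn
  cases hl : ch.toList with
  | nil => simp
  | cons c t =>
    rw [if_neg (by simp)]
    rw [est_adn_loop_eq]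
    simp [List.getD]

theorem alt_eq_all (ch : String) :
    est_adn_alt ch = (decide (ch.toList.length > 0) && ch.toList.all est_base) := by
  unfold est_adn_alt
  congr 1
  rcases Bool.eq_false_or_eq_true (PySem.Set.issubset (PySem.Set.ofList ch.toList) ['A', 'T', 'G', 'C']) with h | h
  · rw [h]
    symm
    rw [List.all_eq_true]
    rw [PySem.Set.issubset_iff] at h
    intro x hx
    have := h x ((PySem.Set.mem_ofList ch.toList x).mpr hx)
    simp [est_base] at this ⊢
    tauto
  · rw [h]
    symm
    rw [Bool.eq_false_iff] at h ⊢
    intro hall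
    apply h
    rw [PySem.Set.issubset_iff]
    intro x hx
    rw [PySem.Set.mem_ofList] at hx
    have := List.all_eq_true.mp hall x hx
    simp [est_base] at this ⊢
    tauto

-- ===== VERDICT (by name: the statement is the Claim_ definition above) =====
theorem est_adn_spec : Claim_equal_est_adn := by
  intro ch _
  unfold Spec_est_adn
  rw [est_adn_eq_all, alt_eq_all]
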